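-- pv_equiv track=rewrite | github.com/LazareLive/AutomatedDices | Dice_Script.py | sequenceNumberPrismDice
-- ===== SOURCE A (Python) =====
-- import math, os
--
-- def isEven(n):
--     return ((n % 2) == 0)
--
-- def recursiveDiceNumberSequence(order):
--     #There are several "notable" sequences that we will use for the dice number sequence. They are called triad,
--     #tetrad and pentad. As order cannot be less than 3, we will only use these sequences to generate any dice.
--     #The goal will be to divide the number of faces until we can find a sequence. These sequences are generated by
--     #using various calculations on the classic dices.
--     #Tetrad case - Taken on the D3 and D6 dequences
--     if(order == 3):
--         return [3, 1, 2]
--     #Tetrad case - Taken on the D8 sequence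
--     elif(order == 4):
--         return [4, 1, 3, 2]
--     #Pentad case - Taken on the D10 sequence -- to be checked. This does not feel right
--     elif(order == 5):
--         return [5, 1, 4, 2, 3]
--     #For any other cases : use recursion until we find a n-ad sequence
--     newOrder = math.trunc(order / 2)
--     recursiveSequence = recursiveDiceNumberSequence(newOrder)
--     #As the recursiveSequence will send half of the information, creation of a new array
--     numberSequence = [0] * order
--     if(isEven(order)):
--         #On the case of an even order dice, check witch method to use based on the last recursion sequence
--         for i in range(newOrder):
--                 #Generate the even-numbers on one polar side
--                 numberSequence[i] = recursiveSequence[i] * 2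
--                 #Generate the odd_numbers on the other side
--                 if(isEven(newOrder)):
--                     #On the even-even case, the last sequence is repeated to generate the current order
--                     numberSequence[newOrder + i] = numberSequence[i] - 1
--                 else:
--                     #On the even-odd case, the last sequence must be inverted to have a weak-strong alternance
--                     numberSequence[newOrder + i] = ((newOrder - recursiveSequence[i] + 1) * 2) - 1
--     else:
--         #On the case of an odd dice order, generate the dice following these rules
--         #Placement of the first number
--         numberSequence[0] = order
--         #Placement of the recursive sequence
--         for i in range(newOrder):
--             #Generation of the even numbers on a polar side of the order
--             numberSequence[i + 1] = recursiveSequence[newOrder - i - 1] * 2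
--             #Generation of the odd numbers
--             numberSequence[order - (i + 1)] = order - numberSequence[i + 1]
--     #Return the number sequence at the end
--     return numberSequence
--
-- def diceNumberAlgorithmSequence(faces):
--     #First: check the number of asked faces. Cannot be less than 3.
--     if(faces < 3):
--         return [(i + 1) for i in range(faces)]
--     #If the number of faces is 4, a specific array must be returned as this cannot be created by the algorithm, and this is
--     #the only solution for a 4 sided die
--     if(faces == 4):
--         return [4, 2, 1, 3]
--     #In all other cases, we need to check whereas the die is even or odd
--     if(isEven(faces)):
--         #If it is even, the generation will follow the standard dice number sequence generation as the opposite sides must be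
--         #equal to the number of the die faces plus one.
--         #Calculation of the even number sequence
--         evenFaces = math.trunc(faces / 2)
--         numberSequenceOrder = recursiveDiceNumberSequence(evenFaces)
--         for i in range(evenFaces):
--             #For each even number generated (NSO multiplied by 2)
--             numberSequenceOrder[i] = numberSequenceOrder[i] * 2
--             #Creation of the opposite side of the die
--             numberSequenceOrder.append(faces - numberSequenceOrder[i] + 1)
--         return numberSequenceOrder
--     else:
--         #If it is odd, the generation is automatically created by the recursion
--         return recursiveDiceNumberSequence(faces)
--     #In case of a problem, always send zero
--     return [0]
--
-- def sequenceNumberPrismDice(faces):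
--     #Get the sequence based on the number of faces
--     sequenceOrder = diceNumberAlgorithmSequence(faces)
--     #If the number of faces is 10, replace 10 with 0
--     if (faces == 10):
--         tenPosition = sequenceOrder.index(10)
--         sequenceOrder[tenPosition] = 0
--     #If even, return the sequence order as is
--     if (isEven(faces)):
--         return sequenceOrder
--     #If odd, generation of a twin-numbered system
--     else:
--         oddSequence = [0] * (faces * 2)
--         for i in range(faces):
--             oddSequence[i * 2] = sequenceOrder[i]
--             oddSequencePosition = ((i * 2) - 1) % (2 * faces)
--             oddSequence[oddSequencePosition] = sequenceOrder[i]
--         return oddSequence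
--     #In case of problem, return something
--     return [0]
-- ===== SOURCE B (Python) =====
-- def _step(o, rec):
--     # Build the order-o sequence from the order-(o//2) sequence rec, without index writes.
--     h = o // 2
--     evens = [2 * x for x in rec]
--     if o % 2 == 0:
--         if h % 2 == 0:
--             return evens + [x - 1 for x in evens]
--         return evens + [(h - x + 1) * 2 - 1 for x in rec]
--     return [o] + evens[::-1] + [o - x for x in evens]
--
-- def _bottom_up(order):
--     # chain of orders by halving down to a base case, then build upward
--     orders = []
--     while order > 5:
--         orders.append(order)
--         order //= 2
--     seq = {3: [3, 1, 2], 4: [4, 1, 3, 2], 5: [5, 1, 4, 2, 3]}[order]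
--     for o in reversed(orders):
--         seq = _step(o, seq)
--     return seq
--
-- def _twin(seq):
--     # interleaved twin numbering: each value at 2i and (2i-1) mod 2n
--     if not seq:
--         return []
--     doubled = [x for v in seq[1:] for x in (v, v)]
--     return [seq[0]] + doubled + [seq[0]]
--
-- def sequenceNumberPrismDice(faces):
--     if faces < 3:
--         seq = list(range(1, faces + 1))
--     elif faces == 4:
--         seq = [4, 2, 1, 3]
--     elif faces % 2 == 0:
--         evens = [2 * x for x in _bottom_up(faces // 2)]
--         seq = evens + [faces - x + 1 for x in evens]
--         if faces == 10:
--             seq = [0 if x == 10 else x for x in seq]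
--     else:
--         seq = _bottom_up(faces)
--     if faces % 2 == 0:
--         return seq
--     return _twin(seq)
-- ===== Notes on version B (the rewrite author's own statement) =====
-- stated objective: alternative
-- what changed: Replaces A's top-down tree recursion that mutates [0]*n arrays by index assignment (and the mutating append loop and twin-interleave index loop) with an iterative bottom-up builder: an explicit halving chain folded from a base table, each level and the final twin sequence built purely by list concatenations, maps and reversal.
import Mathlib
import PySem

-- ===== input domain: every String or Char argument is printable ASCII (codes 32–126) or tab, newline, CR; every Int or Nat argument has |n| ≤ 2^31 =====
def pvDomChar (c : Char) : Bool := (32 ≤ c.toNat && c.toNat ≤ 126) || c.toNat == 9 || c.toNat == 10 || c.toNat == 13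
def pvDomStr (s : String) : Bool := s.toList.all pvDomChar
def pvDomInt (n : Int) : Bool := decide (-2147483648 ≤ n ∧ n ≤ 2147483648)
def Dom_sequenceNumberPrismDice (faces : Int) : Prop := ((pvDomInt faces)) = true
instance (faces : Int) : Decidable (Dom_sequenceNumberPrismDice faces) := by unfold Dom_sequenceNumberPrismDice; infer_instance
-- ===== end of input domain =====

-- B replaces A's top-down tree recursion with index-writes into [0]*n arrays by an
-- iterative bottom-up builder (explicit halving chain + fold) that constructs each level
-- by list concatenation/maps; objective: alternative decomposition, same cost.

-- ===== PORT A =====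

def pyIsEven (n : Int) : Bool := PySem.Int.mod n 2 == 0

-- recursiveDiceNumberSequence; fuel only makes the recursion total (Python recurses on
-- order // 2 and is only ever called with order ≥ 3, where order.toNat fuel suffices).
def recSeqA : Nat → Int → List Int
  | 0, _ => []
  | fuel + 1, order =>
    if order = 3 then [3, 1, 2]
    else if order = 4 then [4, 1, 3, 2]
    else if order = 5 then [5, 1, 4, 2, 3]
    else
      let newOrder := PySem.Int.truncdiv order 2   -- math.trunc(order / 2)
      let recursiveSequence := recSeqA fuel newOrder
      let numberSequence : List Int := List.replicate order.toNat 0   -- [0] * order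
      if pyIsEven order then
        (PySem.List.pyRange 0 newOrder 1).foldl (fun s i =>
          let s1 := PySem.List.pySetD s i (PySem.List.pyGetD recursiveSequence i 0 * 2)
          if pyIsEven newOrder then
            PySem.List.pySetD s1 (newOrder + i) (PySem.List.pyGetD s1 i 0 - 1)
          else
            PySem.List.pySetD s1 (newOrder + i)
              ((newOrder - PySem.List.pyGetD recursiveSequence i 0 + 1) * 2 - 1)) numberSequence
      else
        let numberSequence := PySem.List.pySetD numberSequence 0 order
        (PySem.List.pyRange 0 newOrder 1).foldl (fun s i =>
          let s1 := PySem.List.pySetD s (i + 1)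
            (PySem.List.pyGetD recursiveSequence (newOrder - i - 1) 0 * 2)
          PySem.List.pySetD s1 (order - (i + 1))
            (order - PySem.List.pyGetD s1 (i + 1) 0)) numberSequence

-- diceNumberAlgorithmSequence
def diceA (faces : Int) : List Int :=
  if faces < 3 then (PySem.List.pyRange 0 faces 1).map (fun i => i + 1)
  else if faces = 4 then [4, 2, 1, 3]
  else if pyIsEven faces then
    let evenFaces := PySem.Int.truncdiv faces 2
    let numberSequenceOrder := recSeqA evenFaces.toNat evenFaces
    (PySem.List.pyRange 0 evenFaces 1).foldl (fun s i =>
      let s1 := PySem.List.pySetD s i (PySem.List.pyGetD s i 0 * 2)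
      s1 ++ [faces - PySem.List.pyGetD s1 i 0 + 1]) numberSequenceOrder
  else recSeqA faces.toNat faces

def sequenceNumberPrismDice (faces : Int) : List Int :=
  let sequenceOrder := diceA faces
  let sequenceOrder :=
    if faces = 10 then
      match PySem.List.index? sequenceOrder 10 with
      | some tenPosition => PySem.List.pySetD sequenceOrder (tenPosition : Int) 0
      | none => sequenceOrder   -- Python would raise ValueError; unreachable (faces = 10)
    else sequenceOrder
  if pyIsEven faces then sequenceOrder
  else
    let oddSequence : List Int := List.replicate (faces * 2).toNat 0
    (PySem.List.pyRange 0 faces 1).foldl (fun s i =>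
      let s1 := PySem.List.pySetD s (i * 2) (PySem.List.pyGetD sequenceOrder i 0)
      PySem.List.pySetD s1 (PySem.Int.mod (i * 2 - 1) (2 * faces))
        (PySem.List.pyGetD sequenceOrder i 0)) oddSequence

-- ===== PORT B =====

-- _step
def stepB (o : Int) (rec : List Int) : List Int :=
  let h := PySem.Int.floordiv o 2
  let evens := rec.map (fun x => 2 * x)
  if PySem.Int.mod o 2 == 0 then
    if PySem.Int.mod h 2 == 0 then evens ++ evens.map (fun x => x - 1)
    else evens ++ rec.map (fun x => (h - x + 1) * 2 - 1)
  else [o] ++ evens.reverse ++ evens.map (fun x => o - x)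

-- the while loop of _bottom_up (fuel only makes the loop total; o.toNat suffices)
def ordersB : Nat → Int → List Int → List Int × Int
  | 0, o, acc => (acc, o)
  | fuel + 1, o, acc =>
    if 5 < o then ordersB fuel (PySem.Int.floordiv o 2) (acc ++ [o]) else (acc, o)

-- the base-case table of _bottom_up ([] stands for Python's KeyError, unreachable for order ≥ 3)
def baseB (o : Int) : List Int :=
  if o = 3 then [3, 1, 2] else if o = 4 then [4, 1, 3, 2]
  else if o = 5 then [5, 1, 4, 2, 3] else []

-- _bottom_up: collect the halving chain, then fold the step over it from the base
def bottomUpB (order : Int) : List Int :=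
  let p := ordersB order.toNat order []
  p.1.reverse.foldl (fun s o => stepB o s) (baseB p.2)

-- _twin
def twinB : List Int → List Int
  | [] => []
  | x :: rest => [x] ++ rest.flatMap (fun v => [v, v]) ++ [x]

def sequenceNumberPrismDice_alt (faces : Int) : List Int :=
  let seq :=
    if faces < 3 then PySem.List.pyRange 1 (faces + 1) 1
    else if faces = 4 then [4, 2, 1, 3]
    else if PySem.Int.mod faces 2 == 0 then
      let evens := (bottomUpB (PySem.Int.floordiv faces 2)).map (fun x => 2 * x)
      let s := evens ++ evens.map (fun x => faces - x + 1)
      if faces = 10 then s.map (fun x => if x = 10 then 0 else x) else s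
    else bottomUpB faces
  if PySem.Int.mod faces 2 == 0 then seq else twinB seq

-- ===== PRECONDITION & SPEC =====
def Spec_sequenceNumberPrismDice (faces : Int) (out : List Int) : Prop := out = sequenceNumberPrismDice_alt faces
instance (faces : Int) (out : List Int) : Decidable (Spec_sequenceNumberPrismDice faces out) := by unfold Spec_sequenceNumberPrismDice; infer_instance

-- ===== CLAIM (what is proved, stated in full; the proofs are below) =====
def Claim_equal_sequenceNumberPrismDice : Prop := ∀ (faces : Int), Dom_sequenceNumberPrismDice faces → Spec_sequenceNumberPrismDice faces (sequenceNumberPrismDice faces)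

-- ===== LEMMAS AND PROOFS =====

-- set / getD at the junction of an append (used throughout to track A's index writes)
theorem set_len_append {α : Type} (l1 l2 : List α) (a v : α) :
    (l1 ++ a :: l2).set l1.length v = l1 ++ v :: l2 := by
  induction l1 with
  | nil => simp
  | cons x xs ih => simp [ih]

theorem getD_len_append {α : Type} [Inhabited α] (l1 l2 : List α) (a d : α) :
    (l1 ++ a :: l2).getD l1.length d = a := by
  simp [List.getD]

theorem neg_one_emod (b : Int) (hb : 0 < b) : (-1) % b = b - 1 := by
  conv_lhs => rw [show (-1:Int) = (b-1) + b * (-1) by ring]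
  rw [Int.add_mul_emod_self_left, Int.emod_eq_of_lt (by omega) (by omega)]

theorem length_double_flatMap (l : List Int) :
    (l.flatMap (fun v => [v, v])).length = 2 * l.length := by
  induction l <;> simp_all <;> omega

theorem set_len_append' {α : Type} (l1 l2 : List α) (a v : α) (m : Nat)
    (h : l1.length = m) : (l1 ++ a :: l2).set m v = l1 ++ v :: l2 := by
  subst h; exact set_len_append l1 l2 a v

theorem getD_len_append' {α : Type} [Inhabited α] (l1 l2 : List α) (a d : α) (m : Nat)
    (h : l1.length = m) : (l1 ++ a :: l2).getD m d = a := by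
  subst h; exact getD_len_append l1 l2 a d

-- recursive specification of B's bottom-up builder
def buildSpec (o : Int) : List Int :=
  if h : 5 < o then stepB o (buildSpec (PySem.Int.floordiv o 2)) else baseB o
termination_by o.toNat
decreasing_by
  rw [PySem.Int.floordiv_eq_ediv_of_pos (by omega)]
  omega

def chainSpec (o : Int) : List Int :=
  if h : 5 < o then o :: chainSpec (PySem.Int.floordiv o 2) else []
termination_by o.toNat
decreasing_by
  rw [PySem.Int.floordiv_eq_ediv_of_pos (by omega)]
  omega

def finalSpec (o : Int) : Int :=
  if h : 5 < o then finalSpec (PySem.Int.floordiv o 2) else o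
termination_by o.toNat
decreasing_by
  rw [PySem.Int.floordiv_eq_ediv_of_pos (by omega)]
  omega

theorem ordersB_spec : ∀ (f : Nat) (o : Int) (acc : List Int), o.toNat ≤ f →
    ordersB f o acc = (acc ++ chainSpec o, finalSpec o) := by
  intro f
  induction f with
  | zero =>
    intro o acc h
    have h5 : ¬ 5 < o := by omega
    rw [chainSpec, finalSpec]
    simp [ordersB, h5]
  | succ f ih =>
    intro o acc h
    by_cases h5 : 5 < o
    · have hfd : PySem.Int.floordiv o 2 = o / 2 := PySem.Int.floordiv_eq_ediv_of_pos (by omega)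
      have hle : (PySem.Int.floordiv o 2).toNat ≤ f := by rw [hfd]; omega
      rw [ordersB]
      rw [if_pos h5, ih _ _ hle]
      conv_rhs => rw [chainSpec, finalSpec]
      simp [h5]
    · rw [ordersB]
      rw [if_neg h5, chainSpec, finalSpec]
      simp [h5]

theorem foldl_chainSpec (o : Int) :
    (chainSpec o).reverse.foldl (fun s oo => stepB oo s) (baseB (finalSpec o)) = buildSpec o := by
  suffices H : ∀ (k : Nat) (o : Int), o.toNat ≤ k →
      (chainSpec o).reverse.foldl (fun s oo => stepB oo s) (baseB (finalSpec o)) = buildSpec o by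
    exact H o.toNat o le_rfl
  intro k
  induction k with
  | zero =>
    intro o h
    have h5 : ¬ 5 < o := by omega
    rw [chainSpec, finalSpec, buildSpec]
    simp [h5]
  | succ k ih =>
    intro o h
    by_cases h5 : 5 < o
    · have hfd : PySem.Int.floordiv o 2 = o / 2 := PySem.Int.floordiv_eq_ediv_of_pos (by omega)
      have hle : (PySem.Int.floordiv o 2).toNat ≤ k := by rw [hfd]; omega
      rw [chainSpec, finalSpec, buildSpec]
      simp only [dif_pos h5, if_pos h5, List.reverse_cons, List.foldl_append, List.foldl_cons,
        List.foldl_nil]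
      rw [ih _ hle]
    · rw [chainSpec, finalSpec, buildSpec]
      simp [h5]

theorem bottomUpB_eq_buildSpec (o : Int) : bottomUpB o = buildSpec o := by
  unfold bottomUpB
  rw [ordersB_spec o.toNat o [] (le_refl _)]
  simpa using foldl_chainSpec o

theorem length_buildSpec : ∀ (o : Int), 3 ≤ o → (buildSpec o).length = o.toNat := by
  suffices H : ∀ (k : Nat) (o : Int), 3 ≤ o → o.toNat ≤ k → (buildSpec o).length = o.toNat by
    exact fun o ho => H o.toNat o ho le_rfl
  intro k
  induction k with
  | zero => intro o ho h; omega
  | succ k ih =>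
    intro o ho h
    by_cases h5 : 5 < o
    · have hfd : PySem.Int.floordiv o 2 = o / 2 := PySem.Int.floordiv_eq_ediv_of_pos (by omega)
      have hih : (buildSpec (PySem.Int.floordiv o 2)).length = (PySem.Int.floordiv o 2).toNat := by
        apply ih _ (by rw [hfd]; omega) (by rw [hfd]; omega)
      rw [hfd] at hih
      rw [buildSpec, dif_pos h5]
      rw [stepB]
      simp only [PySem.Int.mod_eq_emod_of_pos (by omega : (0:Int) < 2), hfd]
      by_cases he : o % 2 = 0
      · simp only [he, beq_self_eq_true, if_true]
        split <;>
          simp only [List.length_append, List.length_map, hih, hfd] <;> omega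
      · simp only [beq_iff_eq, he, if_false]
        simp only [List.length_append, List.length_map, List.length_reverse,
          List.length_cons, List.length_nil, hih, hfd]
        omega
    · interval_cases o <;> (rw [buildSpec]; simp [baseB])

-- A's even-even inner loop
theorem foldA_even_even (n : Nat) (rec : List Int) (hn : rec.length = n) :
    (PySem.List.pyRange 0 (n : Int) 1).foldl (fun s i =>
      let s1 := PySem.List.pySetD s i (PySem.List.pyGetD rec i 0 * 2)
      PySem.List.pySetD s1 ((n : Int) + i) (PySem.List.pyGetD s1 i 0 - 1))
      (List.replicate (2 * n) 0)
    = rec.map (fun x => x * 2) ++ rec.map (fun x => x * 2 - 1) := by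
  subst hn
  have key : ∀ m, m ≤ rec.length →
      (PySem.List.pyRange 0 (m : Int) 1).foldl (fun s i =>
        let s1 := PySem.List.pySetD s i (PySem.List.pyGetD rec i 0 * 2)
        PySem.List.pySetD s1 ((rec.length : Int) + i) (PySem.List.pyGetD s1 i 0 - 1))
        (List.replicate (2 * rec.length) 0)
      = (rec.take m).map (fun x => x * 2) ++ List.replicate (rec.length - m) 0
          ++ (rec.take m).map (fun x => x * 2 - 1) ++ List.replicate (rec.length - m) 0 := by
    intro m hm
    induction m with
    | zero =>
      rw [show ((0:Nat):Int) = 0 by simp, PySem.List.pyRange_one_eq_nil le_rfl]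
      simp only [List.take_zero, List.map_nil, List.nil_append, Nat.sub_zero,
        List.foldl_nil]
      rw [two_mul, List.replicate_add]
      simp
    | succ m ih =>
      have hmlt : m < rec.length := by omega
      rw [show (((m+1:Nat)):Int) = (m:Int)+1 by push_cast; ring,
        PySem.List.pyRange_one_succ_right (by positivity), List.foldl_append,
        ih (by omega)]
      simp only [List.foldl_cons, List.foldl_nil]
      rw [show ((rec.length : Int) + (m : Int)) = ((rec.length + m : Nat) : Int) by
        push_cast; ring]
      simp only [PySem.List.pySetD_natCast, PySem.List.pyGetD_natCast]
      rw [List.getD_eq_getElem rec 0 hmlt]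
      rw [show rec.length - m = (rec.length - m - 1) + 1 from by omega, List.replicate_succ]
      simp only [List.append_assoc, List.cons_append]
      have hP1 : (List.map (fun x : Int => x * 2) (List.take m rec)).length = m := by
        simp; omega
      rw [set_len_append' _ _ _ _ _ hP1, getD_len_append' _ _ _ _ _ hP1]
      rw [show (List.map (fun x : Int => x * 2) (List.take m rec) ++
          rec[m] * 2 ::
            (List.replicate (rec.length - m - 1) (0:Int) ++
              (List.map (fun x => x * 2 - 1) (List.take m rec) ++ 0 :: List.replicate (rec.length - m - 1) 0)))
        = ((List.map (fun x : Int => x * 2) (List.take m rec) ++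
          rec[m] * 2 ::
            (List.replicate (rec.length - m - 1) (0:Int) ++
              List.map (fun x => x * 2 - 1) (List.take m rec))) ++ 0 :: List.replicate (rec.length - m - 1) 0)
        from by simp]
      rw [set_len_append' _ _ _ _ _ (by simp [hP1]; omega)]
      rw [List.take_add_one]
      simp [List.getElem?_eq_getElem hmlt, Nat.sub_sub]
      rw [List.take_add_one, List.take_add_one]
      simp [List.getElem?_map, List.getElem?_eq_getElem hmlt]
  have := key rec.length le_rfl
  simpa using this

-- A's even-odd inner loop
theorem foldA_even_odd (n : Nat) (rec : List Int) (hn : rec.length = n) :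
    (PySem.List.pyRange 0 (n : Int) 1).foldl (fun s i =>
      let s1 := PySem.List.pySetD s i (PySem.List.pyGetD rec i 0 * 2)
      PySem.List.pySetD s1 ((n : Int) + i)
        (((n : Int) - PySem.List.pyGetD rec i 0 + 1) * 2 - 1))
      (List.replicate (2 * n) 0)
    = rec.map (fun x => x * 2) ++ rec.map (fun x => ((n : Int) - x + 1) * 2 - 1) := by
  subst hn
  have key : ∀ m, m ≤ rec.length →
      (PySem.List.pyRange 0 (m : Int) 1).foldl (fun s i =>
        let s1 := PySem.List.pySetD s i (PySem.List.pyGetD rec i 0 * 2)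
        PySem.List.pySetD s1 ((rec.length : Int) + i)
          (((rec.length : Int) - PySem.List.pyGetD rec i 0 + 1) * 2 - 1))
        (List.replicate (2 * rec.length) 0)
      = (rec.take m).map (fun x => x * 2) ++ List.replicate (rec.length - m) 0
          ++ (rec.take m).map (fun x => ((rec.length : Int) - x + 1) * 2 - 1)
          ++ List.replicate (rec.length - m) 0 := by
    intro m hm
    induction m with
    | zero =>
      rw [show ((0:Nat):Int) = 0 by simp, PySem.List.pyRange_one_eq_nil le_rfl]
      simp only [List.take_zero, List.map_nil, List.nil_append, Nat.sub_zero,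
        List.foldl_nil]
      rw [two_mul, List.replicate_add]
      simp
    | succ m ih =>
      have hmlt : m < rec.length := by omega
      rw [show (((m+1:Nat)):Int) = (m:Int)+1 by push_cast; ring,
        PySem.List.pyRange_one_succ_right (by positivity), List.foldl_append,
        ih (by omega)]
      simp only [List.foldl_cons, List.foldl_nil]
      rw [show ((rec.length : Int) + (m : Int)) = ((rec.length + m : Nat) : Int) by
        push_cast; ring]
      simp only [PySem.List.pySetD_natCast, PySem.List.pyGetD_natCast]
      rw [List.getD_eq_getElem rec 0 hmlt]
      rw [show rec.length - m = (rec.length - m - 1) + 1 from by omega, List.replicate_succ]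
      simp only [List.append_assoc, List.cons_append]
      have hP1 : (List.map (fun x : Int => x * 2) (List.take m rec)).length = m := by
        simp; omega
      rw [set_len_append' _ _ _ _ _ hP1]
      rw [show (List.map (fun x : Int => x * 2) (List.take m rec) ++
          rec[m] * 2 ::
            (List.replicate (rec.length - m - 1) (0:Int) ++
              (List.map (fun x => ((rec.length : Int) - x + 1) * 2 - 1) (List.take m rec)
                ++ 0 :: List.replicate (rec.length - m - 1) 0)))
        = ((List.map (fun x : Int => x * 2) (List.take m rec) ++
          rec[m] * 2 ::
            (List.replicate (rec.length - m - 1) (0:Int) ++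
              List.map (fun x => ((rec.length : Int) - x + 1) * 2 - 1) (List.take m rec)))
            ++ 0 :: List.replicate (rec.length - m - 1) 0)
        from by simp]
      rw [set_len_append' _ _ _ _ _ (by simp [hP1]; omega)]
      rw [List.take_add_one]
      simp [List.getElem?_eq_getElem hmlt, Nat.sub_sub]
      rw [List.take_add_one, List.take_add_one]
      simp [List.getElem?_map, List.getElem?_eq_getElem hmlt]
  have := key rec.length le_rfl
  simpa using this

-- A's odd inner loop
theorem foldA_odd (n : Nat) (o : Int) (rec : List Int) (hn : rec.length = n)
    (ho : o = 2 * (n : Int) + 1) :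
    (PySem.List.pyRange 0 ((n : Int)) 1).foldl (fun s i =>
      let s1 := PySem.List.pySetD s (i + 1)
        (PySem.List.pyGetD rec ((n : Int) - i - 1) 0 * 2)
      PySem.List.pySetD s1 (o - (i + 1)) (o - PySem.List.pyGetD s1 (i + 1) 0))
      (PySem.List.pySetD (List.replicate (2 * n + 1) 0) 0 o)
    = [o] ++ ((List.range n).map (fun j => rec.getD (n - 1 - j) 0 * 2))
        ++ ((List.range n).map (fun j => o - rec.getD (n - 1 - j) 0 * 2)).reverse := by
  subst hn
  subst ho
  rw [show (0:Int) = ((0:Nat):Int) by simp, PySem.List.pySetD_natCast,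
    List.replicate_succ, List.set_cons_zero]
  have key : ∀ m, m ≤ rec.length →
      (PySem.List.pyRange 0 (m : Int) 1).foldl (fun s i =>
        let s1 := PySem.List.pySetD s (i + 1)
          (PySem.List.pyGetD rec ((rec.length : Int) - i - 1) 0 * 2)
        PySem.List.pySetD s1 (2 * (rec.length : Int) + 1 - (i + 1))
          (2 * (rec.length : Int) + 1 - PySem.List.pyGetD s1 (i + 1) 0))
        ((2 * (rec.length : Int) + 1) :: List.replicate (2 * rec.length) 0)
      = (2 * (rec.length : Int) + 1) ::
          ((List.range m).map (fun j => rec.getD (rec.length - 1 - j) 0 * 2)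
            ++ (List.replicate (2 * rec.length - 2 * m) 0
              ++ ((List.range m).map (fun j =>
                    2 * (rec.length : Int) + 1 - rec.getD (rec.length - 1 - j) 0 * 2)).reverse)) := by
    intro m hm
    induction m with
    | zero =>
      rw [show ((0:Nat):Int) = 0 by simp, PySem.List.pyRange_one_eq_nil le_rfl]
      simp
    | succ m ih =>
      have hmlt : m < rec.length := by omega
      rw [show (((m+1:Nat)):Int) = (m:Int)+1 by push_cast; ring,
        PySem.List.pyRange_one_succ_right (by positivity), List.foldl_append,
        ih (by omega)]
      simp only [List.foldl_cons, List.foldl_nil]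
      rw [show ((m:Int) + 1) = ((m + 1 : Nat) : Int) by push_cast; ring]
      rw [show ((rec.length : Int) - (m:Nat) - 1) = ((rec.length - 1 - m : Nat) : Int) by omega]
      rw [show (2 * (rec.length : Int) + 1 - ((m + 1 : Nat) : Int))
          = ((2 * rec.length - m : Nat) : Int) by omega]
      simp only [PySem.List.pySetD_natCast, PySem.List.pyGetD_natCast]
      rw [List.set_cons_succ, List.getD_cons_succ]
      rw [show 2 * rec.length - 2 * m = (2 * rec.length - 2 * m - 1) + 1 from by omega,
        List.replicate_succ]
      simp only [List.cons_append]
      have hP1 : ((List.range m).map (fun j =>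
          rec.getD (rec.length - 1 - j) 0 * 2)).length = m := by simp
      rw [set_len_append' _ _ _ _ _ hP1, getD_len_append' _ _ _ _ _ hP1]
      rw [show 2 * rec.length - m = (2 * rec.length - m - 1) + 1 from by omega,
        List.set_cons_succ]
      rw [show 2 * rec.length - 2 * m - 1 = (2 * rec.length - 2 * m - 2) + 1 from by omega,
        List.replicate_succ']
      rw [show ((List.range m).map (fun j => rec.getD (rec.length - 1 - j) 0 * 2) ++
          (rec.getD (rec.length - 1 - m) 0 * 2) ::
            ((List.replicate (2 * rec.length - 2 * m - 2) (0:Int) ++ [0]) ++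
              ((List.range m).map (fun j =>
                2 * (rec.length : Int) + 1 - rec.getD (rec.length - 1 - j) 0 * 2)).reverse))
        = (((List.range m).map (fun j => rec.getD (rec.length - 1 - j) 0 * 2) ++
          (rec.getD (rec.length - 1 - m) 0 * 2) ::
            List.replicate (2 * rec.length - 2 * m - 2) (0:Int)) ++
              (0:Int) :: ((List.range m).map (fun j =>
                2 * (rec.length : Int) + 1 - rec.getD (rec.length - 1 - j) 0 * 2)).reverse)
        from by simp]
      rw [set_len_append' _ _ _ _ _ (by simp; omega)]
      simp [List.range_succ, Nat.sub_sub, Nat.mul_sub, Nat.mul_add]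
  have := key rec.length le_rfl
  simpa using this

-- A's outer even loop in diceNumberAlgorithmSequence
theorem foldA_outer (faces : Int) (n : Nat) (rec : List Int) (hn : rec.length = n) :
    (PySem.List.pyRange 0 (n : Int) 1).foldl (fun s i =>
      let s1 := PySem.List.pySetD s i (PySem.List.pyGetD s i 0 * 2)
      s1 ++ [faces - PySem.List.pyGetD s1 i 0 + 1]) rec
    = rec.map (fun x => x * 2) ++ rec.map (fun x => faces - x * 2 + 1) := by
  subst hn
  have key : ∀ m, m ≤ rec.length →
      (PySem.List.pyRange 0 (m : Int) 1).foldl (fun s i =>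
        let s1 := PySem.List.pySetD s i (PySem.List.pyGetD s i 0 * 2)
        s1 ++ [faces - PySem.List.pyGetD s1 i 0 + 1]) rec
      = (rec.take m).map (fun x => x * 2) ++ rec.drop m
          ++ (rec.take m).map (fun x => faces - x * 2 + 1) := by
    intro m hm
    induction m with
    | zero =>
      rw [show ((0:Nat):Int) = 0 by simp, PySem.List.pyRange_one_eq_nil le_rfl]
      simp
    | succ m ih =>
      have hmlt : m < rec.length := by omega
      rw [show (((m+1:Nat)):Int) = (m:Int)+1 by push_cast; ring,
        PySem.List.pyRange_one_succ_right (by positivity), List.foldl_append,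
        ih (by omega)]
      simp only [List.foldl_cons, List.foldl_nil, PySem.List.pySetD_natCast,
        PySem.List.pyGetD_natCast]
      rw [List.drop_eq_getElem_cons hmlt]
      have hP1 : ((rec.take m).map (fun x => x * 2)).length = m := by
        simp [List.length_take]; omega
      rw [List.append_assoc, List.cons_append,
        getD_len_append' _ _ _ _ _ hP1, set_len_append' _ _ _ _ _ hP1,
        getD_len_append' _ _ _ _ _ hP1]
      simp [List.getElem?_map, List.getElem?_eq_getElem hmlt]
      rw [List.take_add_one, List.take_add_one]
      simp [List.getElem?_map, List.getElem?_eq_getElem hmlt]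
  have := key rec.length le_rfl
  simpa using this

-- A's twin loop in sequenceNumberPrismDice
theorem foldA_twin (n : Nat) (q : List Int) (hq : q.length = n) (hn : 1 ≤ n) :
    (PySem.List.pyRange 0 (n : Int) 1).foldl (fun s i =>
      let s1 := PySem.List.pySetD s (i * 2) (PySem.List.pyGetD q i 0)
      PySem.List.pySetD s1 (PySem.Int.mod (i * 2 - 1) (2 * (n : Int)))
        (PySem.List.pyGetD q i 0)) (List.replicate (2 * n) 0)
    = twinB q := by
  match q with
  | [] => simp at hq; omega
  | q0 :: qt =>
  have hN : n = qt.length + 1 := by simp at hq; omega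
  subst hN
  rw [PySem.List.pyRange_one_cons (by positivity)]
  simp only [List.foldl_cons]
  have hmod0 : PySem.Int.mod ((0:Int) * 2 - 1) (2 * ((qt.length + 1 : Nat) : Int))
      = ((2 * qt.length + 1 : Nat) : Int) := by
    rw [PySem.Int.mod_eq_emod_of_pos (by positivity),
      show ((0:Int) * 2 - 1) = (-1 : Int) by ring, neg_one_emod _ (by positivity)]
    push_cast; ring
  rw [hmod0]
  rw [show ((0:Int) * 2) = ((0:Nat):Int) by simp]
  simp only [PySem.List.pyGetD_zero_cons, PySem.List.pySetD_natCast]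
  rw [show 2 * (qt.length + 1) = (2 * qt.length + 1) + 1 from by omega,
    List.replicate_succ, List.set_cons_zero]
  rw [show (2 * qt.length + 1 : Nat) = (2 * qt.length) + 1 from rfl, List.set_cons_succ]
  rw [List.replicate_succ', set_len_append' _ _ _ _ _ (by simp)]
  rw [show ((0:Int) + 1) = (1:Int) by norm_num]
  have key : ∀ m, m + 1 ≤ qt.length + 1 →
      (PySem.List.pyRange 1 ((m + 1 : Nat) : Int) 1).foldl (fun s i =>
        let s1 := PySem.List.pySetD s (i * 2) (PySem.List.pyGetD (q0 :: qt) i 0)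
        PySem.List.pySetD s1
          (PySem.Int.mod (i * 2 - 1) (2 * ((qt.length + 1 : Nat) : Int)))
          (PySem.List.pyGetD (q0 :: qt) i 0))
        (q0 :: (List.replicate (2 * qt.length) 0 ++ [q0]))
      = q0 :: ((qt.take m).flatMap (fun v => [v, v])
          ++ (List.replicate (2 * qt.length - 2 * m) 0 ++ [q0])) := by
    intro m hm
    induction m with
    | zero =>
      rw [show ((0 + 1 : Nat) : Int) = 1 by simp, PySem.List.pyRange_one_eq_nil le_rfl]
      simp
    | succ m ih =>
      have hmlt : m + 1 ≤ qt.length := by omega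
      rw [show ((m + 1 + 1 : Nat) : Int) = ((m + 1 : Nat) : Int) + 1 by push_cast; ring,
        PySem.List.pyRange_one_succ_right (by push_cast; omega), List.foldl_append,
        ih (by omega)]
      simp only [List.foldl_cons, List.foldl_nil]
      have hmod : PySem.Int.mod (((m + 1 : Nat) : Int) * 2 - 1)
          (2 * ((qt.length + 1 : Nat) : Int)) = ((2 * m + 1 : Nat) : Int) := by
        rw [PySem.Int.mod_eq_emod_of_pos (by positivity)]
        rw [Int.emod_eq_of_lt (by push_cast; omega) (by push_cast; omega)]
        push_cast; ring
      rw [hmod]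
      rw [show (((m + 1 : Nat) : Int) * 2) = ((2 * m + 2 : Nat) : Int) by push_cast; ring]
      rw [show PySem.List.pyGetD (q0 :: qt) (((m + 1 : Nat)) : Int) 0
          = qt.getD m 0 from by
        rw [PySem.List.pyGetD_natCast, List.getD_cons_succ]]
      simp only [PySem.List.pySetD_natCast]
      have hF : ((qt.take m).flatMap (fun v => [v, v])).length = 2 * m := by
        rw [length_double_flatMap]; simp; omega
      rw [show (2 * m + 2 : Nat) = (2 * m + 1) + 1 from rfl, List.set_cons_succ]
      rw [show 2 * qt.length - 2 * m = ((2 * qt.length - 2 * m - 2) + 1) + 1 from by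
        omega]
      rw [List.replicate_succ, List.replicate_succ]
      rw [show ((qt.take m).flatMap (fun v => [v, v]) ++
          (((0:Int) :: (0:Int) :: List.replicate (2 * qt.length - 2 * m - 2) 0) ++ [q0]))
        = (((qt.take m).flatMap (fun v => [v, v]) ++ [(0:Int)]) ++
          (0:Int) :: (List.replicate (2 * qt.length - 2 * m - 2) 0 ++ [q0]))
        from by simp]
      rw [set_len_append' _ _ _ _ _ (by simp [hF])]
      rw [show (2 * m + 1 : Nat) = (2 * m) + 1 from rfl, List.set_cons_succ]
      rw [show (((qt.take m).flatMap (fun v => [v, v]) ++ [(0:Int)]) ++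
          (qt.getD m 0) :: (List.replicate (2 * qt.length - 2 * m - 2) 0 ++ [q0]))
        = ((qt.take m).flatMap (fun v => [v, v]) ++
          (0:Int) :: ((qt.getD m 0) :: (List.replicate (2 * qt.length - 2 * m - 2) 0 ++ [q0])))
        from by simp]
      rw [set_len_append' _ _ _ _ _ hF]
      have hmq : m < qt.length := by omega
      rw [List.take_add_one, List.getElem?_eq_getElem hmq]
      simp [List.getD_eq_getElem qt 0 hmq, Nat.sub_sub]
      rw [List.take_add_one, List.getElem?_eq_getElem hmq]
      simp only [Option.toList_some, List.flatMap_append, List.flatMap_cons,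
        List.flatMap_nil, List.append_nil, List.append_assoc, List.cons_append,
        List.nil_append]
      simp only [Option.getD_some, Nat.mul_add, Nat.mul_one]
  have := key qt.length le_rfl
  rw [show 2 * qt.length - 2 * qt.length = 0 from by omega] at this
  simp only [List.take_length, List.replicate_zero, List.nil_append] at this
  rw [this, twinB]
  simp

-- the recursion of A computes B's bottom-up result
theorem map_range_rev (g : Int → Int) (l : List Int) (n : Nat) (h : l.length = n) :
    (List.range n).map (fun j => g (l.getD (n - 1 - j) 0)) = (l.map g).reverse := by
  apply List.ext_getElem (by simp [h])
  intro k h1 h2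
  have hk : k < n := by simpa using h1
  have hb : n - 1 - k < l.length := by omega
  simp [List.getElem_reverse, List.getD_eq_getElem l 0 hb, h, List.getElem?_eq_getElem hb]

theorem recSeqA_eq_buildSpec : ∀ (f : Nat) (o : Int), 3 ≤ o → o.toNat ≤ f →
    recSeqA f o = buildSpec o := by
  intro f
  induction f with
  | zero => intro o h3 hf; omega
  | succ f ih =>
    intro o h3 hf
    by_cases h5 : 5 < o
    · have hfd : PySem.Int.floordiv o 2 = o / 2 := PySem.Int.floordiv_eq_ediv_of_pos (by omega)
      have htd : PySem.Int.truncdiv o 2 = PySem.Int.floordiv o 2 := by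
        rw [show PySem.Int.truncdiv o 2 = o.tdiv 2 from rfl,
          Int.tdiv_eq_ediv_of_nonneg (by omega), ← hfd]
      have h3' : 3 ≤ PySem.Int.floordiv o 2 := by rw [hfd]; omega
      have hfle : (PySem.Int.floordiv o 2).toNat ≤ f := by rw [hfd]; omega
      have hrec : recSeqA f (PySem.Int.floordiv o 2) = buildSpec (PySem.Int.floordiv o 2) :=
        ih _ h3' hfle
      have hlen : (buildSpec (PySem.Int.floordiv o 2)).length = (PySem.Int.floordiv o 2).toNat :=
        length_buildSpec _ h3'
      set n : Nat := (PySem.Int.floordiv o 2).toNat with hn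
      have hcast : PySem.Int.floordiv o 2 = ((n : Nat) : Int) := by rw [hn, hfd]; omega
      rw [recSeqA]
      rw [if_neg (by omega), if_neg (by omega), if_neg (by omega)]
      have hrec' : recSeqA f ((n : Nat) : Int) = buildSpec ((n : Nat) : Int) := by
        rw [← hcast]; exact hrec
      have hlen' : (buildSpec ((n : Nat) : Int)).length = n := by
        rw [← hcast, hlen]
      rw [buildSpec, dif_pos h5, stepB]
      simp only [htd, hcast, hrec']
      by_cases hpar : o % 2 = 0
      · have hev : pyIsEven o = true := by
          simp [pyIsEven, PySem.Int.mod_eq_emod_of_pos (by omega : (0:Int) < 2), hpar]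
        have hmodo : (PySem.Int.mod o 2 == 0) = true := by
          simp [PySem.Int.mod_eq_emod_of_pos (by omega : (0:Int) < 2), hpar]
        have hrepl : o.toNat = 2 * n := by rw [hn, hfd]; omega
        simp only [hev, hmodo, hrepl, reduceIte]
        by_cases hpn : pyIsEven ((n : Nat) : Int) = true
        · have hmodn : (PySem.Int.mod ((n : Nat) : Int) 2 == 0) = true := hpn
          simp only [hpn, hmodn, reduceIte]
          rw [foldA_even_even n _ hlen']
          simp [List.map_map, mul_comm]
        · have hmodn : (PySem.Int.mod ((n : Nat) : Int) 2 == 0) = false := by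
            simpa [pyIsEven] using hpn
          simp only [hpn, hmodn, reduceIte, Bool.false_eq_true, if_false]
          rw [foldA_even_odd n _ hlen']
          simp [List.map_map, mul_comm]
      · have hev : pyIsEven o = false := by
          simp [pyIsEven, PySem.Int.mod_eq_emod_of_pos (by omega : (0:Int) < 2), hpar]
        have hmodo : (PySem.Int.mod o 2 == 0) = false := by
          simp [PySem.Int.mod_eq_emod_of_pos (by omega : (0:Int) < 2), hpar]
        have hodd : o % 2 = 1 := by omega
        have hrepl : o.toNat = 2 * n + 1 := by rw [hn, hfd]; omega
        have ho2 : o = 2 * ((n : Nat) : Int) + 1 := by rw [← hcast, hfd]; omega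
        simp only [hev, hmodo, hrepl, Bool.false_eq_true, if_false, reduceIte]
        rw [foldA_odd n o _ hlen' ho2]
        rw [map_range_rev (fun x => x * 2) _ n hlen',
          map_range_rev (fun x => o - x * 2) _ n hlen']
        simp [List.map_map, mul_comm]
    · interval_cases o <;> (rw [recSeqA, buildSpec]; norm_num [baseB])


-- ===== VERDICT (by name: the statement is the Claim_ definition above) =====
theorem shift_range (faces : Int) :
    (PySem.List.pyRange 0 faces 1).map (fun i => i + 1)
      = PySem.List.pyRange 1 (faces + 1) 1 := by
  rw [PySem.List.pyRange_one, PySem.List.pyRange_one]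
  rw [show faces + 1 - 1 = faces - 0 from by ring]
  simp [List.map_map]
  intro a _
  omega

theorem sequenceNumberPrismDice_spec : Claim_equal_sequenceNumberPrismDice := by
  intro faces _
  show sequenceNumberPrismDice faces = sequenceNumberPrismDice_alt faces
  by_cases h10 : faces = 10
  · subst h10; decide
  by_cases h1 : faces = 1
  · subst h1; decide
  by_cases h4 : faces = 4
  · subst h4; decide
  have c2 : (faces = 4) = False := eq_false h4
  have c3 : (faces = 10) = False := eq_false h10
  by_cases hlt : faces < 3
  · -- small inputs
    have c1 : (faces < 3) = True := eq_true hlt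
    by_cases hpar : faces % 2 = 0
    · have hev : pyIsEven faces = true := by
        simp [pyIsEven, PySem.Int.mod_eq_emod_of_pos (by omega : (0:Int) < 2), hpar]
      have hmodB : (PySem.Int.mod faces 2 == 0) = true := by
        simp [PySem.Int.mod_eq_emod_of_pos (by omega : (0:Int) < 2), hpar]
      simp only [sequenceNumberPrismDice, sequenceNumberPrismDice_alt, diceA, c1, c3,
        hev, hmodB, if_true, if_false, reduceIte]
      exact shift_range faces
    · have hneg : faces ≤ -1 := by omega
      have hev : pyIsEven faces = false := by
        simp [pyIsEven, PySem.Int.mod_eq_emod_of_pos (by omega : (0:Int) < 2), hpar]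
      have hmodB : (PySem.Int.mod faces 2 == 0) = false := by
        simp [PySem.Int.mod_eq_emod_of_pos (by omega : (0:Int) < 2), hpar]
      simp only [sequenceNumberPrismDice, sequenceNumberPrismDice_alt, diceA, c1, c3,
        hev, hmodB, Bool.false_eq_true, if_true, if_false, reduceIte]
      rw [PySem.List.pyRange_one_eq_nil (by omega : faces ≤ 0),
        PySem.List.pyRange_one_eq_nil (by omega : faces + 1 ≤ 1)]
      rw [show (faces * 2).toNat = 0 from by omega]
      simp [twinB]
  · have c1 : (faces < 3) = False := eq_false hlt
    by_cases hpar : faces % 2 = 0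
    · -- even, faces ≥ 6
      have h6 : 6 ≤ faces := by omega
      have hfd : PySem.Int.floordiv faces 2 = faces / 2 :=
        PySem.Int.floordiv_eq_ediv_of_pos (by omega)
      have htd : PySem.Int.truncdiv faces 2 = PySem.Int.floordiv faces 2 := by
        rw [show PySem.Int.truncdiv faces 2 = faces.tdiv 2 from rfl,
          Int.tdiv_eq_ediv_of_nonneg (by omega), ← hfd]
      set n : Nat := (PySem.Int.floordiv faces 2).toNat with hn
      have hcast : PySem.Int.floordiv faces 2 = ((n : Nat) : Int) := by
        rw [hn, hfd]; omega
      have h3n : (3:Int) ≤ ((n : Nat) : Int) := by rw [← hcast, hfd]; omega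
      have hrecn : recSeqA ((n : Nat) : Int).toNat ((n : Nat) : Int)
          = buildSpec ((n : Nat) : Int) :=
        recSeqA_eq_buildSpec _ _ h3n (by simp)
      have hlenn : (buildSpec ((n : Nat) : Int)).length = n := by
        rw [length_buildSpec _ h3n]; simp
      have hev : pyIsEven faces = true := by
        simp [pyIsEven, PySem.Int.mod_eq_emod_of_pos (by omega : (0:Int) < 2), hpar]
      have hmodB : (PySem.Int.mod faces 2 == 0) = true := by
        simp [PySem.Int.mod_eq_emod_of_pos (by omega : (0:Int) < 2), hpar]
      simp only [sequenceNumberPrismDice, sequenceNumberPrismDice_alt, diceA, c1, c2, c3,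
        hev, hmodB, if_true, if_false, reduceIte]
      rw [htd, hcast, hrecn]
      rw [foldA_outer faces n _ hlenn]
      rw [bottomUpB_eq_buildSpec]
      simp [List.map_map, mul_comm]
    · -- odd, faces ≥ 3
      have h3f : 3 ≤ faces := by omega
      have hev : pyIsEven faces = false := by
        simp [pyIsEven, PySem.Int.mod_eq_emod_of_pos (by omega : (0:Int) < 2), hpar]
      have hmodB : (PySem.Int.mod faces 2 == 0) = false := by
        simp [PySem.Int.mod_eq_emod_of_pos (by omega : (0:Int) < 2), hpar]
      have hrec : recSeqA faces.toNat faces = buildSpec faces :=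
        recSeqA_eq_buildSpec _ _ h3f le_rfl
      set N : Nat := faces.toNat with hNn
      have hNc : faces = ((N : Nat) : Int) := by omega
      have hlenN : (buildSpec ((N : Nat) : Int)).length = N := by
        rw [length_buildSpec _ (by omega)]; simp
      simp only [sequenceNumberPrismDice, sequenceNumberPrismDice_alt, diceA, c1, c2, c3,
        hev, hmodB, Bool.false_eq_true, if_true, if_false, reduceIte]
      rw [hrec, bottomUpB_eq_buildSpec]
      rw [hNc]
      rw [show ((((N : Nat) : Int)) * 2).toNat = 2 * N from by omega]
      rw [foldA_twin N _ hlenN (by omega)]
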